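-- pv_equiv track=rewrite | github.com/michaellong103/ai_switcher | dynamic_phases/testing/test_nct_comparison.py | compare_nct_sets
-- ===== SOURCE A (Python) =====
-- def compare_nct_sets(nct_sets):
--     # Compare all sets and report any discrepancies
--     all_ncts = set.union(*nct_sets.values())
--     discrepancies = {}
--
--     for name, nct_set in nct_sets.items():
--         missing_in_others = all_ncts - nct_set
--         if missing_in_others:
--             discrepancies[name] = missing_in_others
--
--     return discrepancies
-- ===== SOURCE B (Python) =====
-- def compare_nct_sets(nct_sets):
--     # Inverted index: nct -> list of names whose set contains it; each name's
--     # missing elements are then read off the index in one membership pass.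
--     containing = {}
--     for name, nct_set in nct_sets.items():
--         for nct in nct_set:
--             containing.setdefault(nct, []).append(name)
--
--     discrepancies = {}
--     for name in nct_sets:
--         missing = {nct for nct, names in containing.items() if name not in names}
--         if missing:
--             discrepancies[name] = missing
--
--     return discrepancies
-- ===== Notes on version B (the rewrite author's own statement) =====
-- stated objective: alternative
-- what changed: B replaces the per-set bulk set-differences against a precomputed union by an inverted index mapping each nct to the names whose set contains it, from which each name's missing set is read by membership tests.
import Mathlib
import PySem

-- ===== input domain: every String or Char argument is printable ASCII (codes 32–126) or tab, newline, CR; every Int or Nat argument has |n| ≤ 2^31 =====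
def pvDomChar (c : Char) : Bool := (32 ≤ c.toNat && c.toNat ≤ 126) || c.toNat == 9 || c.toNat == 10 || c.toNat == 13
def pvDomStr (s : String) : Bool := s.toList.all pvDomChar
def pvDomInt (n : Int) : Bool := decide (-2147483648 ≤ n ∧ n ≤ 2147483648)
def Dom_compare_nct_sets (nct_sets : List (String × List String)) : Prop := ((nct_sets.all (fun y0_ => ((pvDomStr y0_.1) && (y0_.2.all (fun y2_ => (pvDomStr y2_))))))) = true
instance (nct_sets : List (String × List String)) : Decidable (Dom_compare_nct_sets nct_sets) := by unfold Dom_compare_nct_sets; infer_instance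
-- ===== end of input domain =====

-- B builds an inverted index (nct -> names containing it) instead of A's per-set
-- bulk set-differences against a precomputed union; same result, different traversal.
-- Return-value equivalence only; neither program mutates its argument.

-- ===== PORT A =====
def compare_nct_sets (nct_sets : List (String × List String)) : List (String × List String) :=
  match nct_sets with
  | [] => []  -- Python: set.union(*[]) raises TypeError here; excluded by Pre_
  | p0 :: rest =>
    let all_ncts : PySem.Set String :=
      rest.foldl (fun acc p => PySem.Set.union acc p.2) (PySem.Set.ofList p0.2)
    -- discrepancies dict: names are distinct (dict keys), so each insert appends
    nct_sets.foldl (fun disc p =>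
      let missing := PySem.Set.diff all_ncts p.2
      if missing.isEmpty then disc else disc ++ [(p.1, missing)]) []

-- ===== PORT B =====
def compare_nct_sets_alt (nct_sets : List (String × List String)) : List (String × List String) :=
  let containing : PySem.Dict String (List String) :=
    nct_sets.foldl (fun d p =>
      p.2.foldl (fun d nct => d.modify nct [] (fun names => names ++ [p.1])) d)
      PySem.Dict.empty
  nct_sets.foldl (fun disc p =>
    let missing : PySem.Set String :=
      PySem.Set.ofList ((containing.items.filter (fun q => !(q.2.contains p.1))).map Prod.fst)
    if missing.isEmpty then disc else disc ++ [(p.1, missing)]) []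

-- ===== PRECONDITION & SPEC =====
-- Pre_ excludes the empty dict (A raises TypeError there) and association lists with
-- duplicate names, which do not represent any Python dict (dict keys are unique).
def Pre_compare_nct_sets (nct_sets : List (String × List String)) : Prop :=
  nct_sets ≠ [] ∧ (nct_sets.map Prod.fst).Nodup
instance (nct_sets : List (String × List String)) : Decidable (Pre_compare_nct_sets nct_sets) := by unfold Pre_compare_nct_sets; infer_instance

def pvWitness_compare_nct_sets : (List (String × List String)) :=
  [("a", ["x"]), ("b", ["x", "y"])]

def Spec_compare_nct_sets (nct_sets : List (String × List String)) (out : List (String × List String)) : Prop := out = compare_nct_sets_alt nct_sets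
instance (nct_sets : List (String × List String)) (out : List (String × List String)) : Decidable (Spec_compare_nct_sets nct_sets out) := by unfold Spec_compare_nct_sets; infer_instance

-- ===== CLAIM (what is proved, stated in full; the proofs are below) =====
def Claim_equal_compare_nct_sets : Prop := ∀ (nct_sets : List (String × List String)), Dom_compare_nct_sets nct_sets → Pre_compare_nct_sets nct_sets → Spec_compare_nct_sets nct_sets (compare_nct_sets nct_sets)

-- ===== LEMMAS AND PROOFS =====

-- the flattened (nct, name) pair list B's nested index-building loop traverses
def pvPairs (nct_sets : List (String × List String)) : List (String × String) :=
  nct_sets.flatMap (fun p => p.2.map (fun nct => (nct, p.1)))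

lemma containing_eq_pairs_fold (nct_sets : List (String × List String))
    (d : PySem.Dict String (List String)) :
    nct_sets.foldl (fun d p =>
      p.2.foldl (fun d nct => d.modify nct [] (fun names => names ++ [p.1])) d) d
    = (pvPairs nct_sets).foldl (fun d q => d.modify q.1 [] (fun names => names ++ [q.2])) d := by
  induction nct_sets generalizing d with
  | nil => simp [pvPairs]
  | cons p rest ih =>
    simp only [List.foldl_cons, pvPairs, List.flatMap_cons, List.foldl_append, List.foldl_map]
    exact ih _

lemma getD_containing (nct_sets : List (String × List String)) (c : String) :
    ((pvPairs nct_sets).foldl (fun d q => d.modify q.1 [] (fun names => names ++ [q.2]))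
      PySem.Dict.empty).getD c []
    = ((pvPairs nct_sets).filter (fun q => q.1 == c)).map (·.2) := by
  rw [PySem.Dict.getD_foldl_modify_append]
  simp

lemma keys_containing (nct_sets : List (String × List String)) :
    ((pvPairs nct_sets).foldl (fun d q => d.modify q.1 [] (fun names => names ++ [q.2]))
      PySem.Dict.empty).keys
    = PySem.Set.ofList (nct_sets.flatMap (fun p => p.2)) := by
  rw [PySem.Dict.keys_foldl_modify_key]
  have : (pvPairs nct_sets).map Prod.fst = nct_sets.flatMap (fun p => p.2) := by
    simp [pvPairs, List.map_flatMap, Function.comp_def]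
  simp [this, PySem.Set.update, PySem.Set.ofList]

lemma all_ncts_eq (p0 : String × List String) (rest : List (String × List String)) :
    rest.foldl (fun acc p => PySem.Set.union acc p.2) (PySem.Set.ofList p0.2)
    = PySem.Set.ofList ((p0 :: rest).flatMap (fun p => p.2)) := by
  have h : ∀ (l : List (String × List String)) (s : PySem.Set String),
      l.foldl (fun acc p => PySem.Set.union acc p.2) s
      = PySem.Set.update s (l.flatMap (fun p => p.2)) := by
    intro l
    induction l with
    | nil => intro s; simp [PySem.Set.update]
    | cons p t ih =>
      intro s
      simp only [List.foldl_cons, List.flatMap_cons]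
      rw [ih]
      simp only [PySem.Set.union, PySem.Set.update, List.foldl_append]
  rw [h]
  simp [PySem.Set.update, PySem.Set.ofList, List.flatMap_cons, List.foldl_append]

-- membership of a name in the index entry at key c
lemma mem_getD_containing (nct_sets : List (String × List String)) (c name : String) :
    name ∈ (((pvPairs nct_sets).foldl
        (fun d q => d.modify q.1 [] (fun names => names ++ [q.2])) PySem.Dict.empty).getD c [])
    ↔ ∃ p ∈ nct_sets, p.1 = name ∧ c ∈ p.2 := by
  rw [getD_containing]
  simp only [List.mem_map, List.mem_filter, pvPairs, List.mem_flatMap, List.mem_map]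
  constructor
  · rintro ⟨q, ⟨⟨p, hp, nct, hnct, rfl⟩, hqc⟩, rfl⟩
    have hnc : nct = c := by simpa using hqc
    subst hnc
    exact ⟨p, hp, rfl, hnct⟩
  · rintro ⟨p, hp, rfl, hc⟩
    exact ⟨(c, p.1), ⟨⟨p, hp, c, hc, rfl⟩, by simp⟩, rfl⟩

-- under unique names, the index membership test equals the direct membership test
lemma contains_getD_containing (nct_sets : List (String × List String))
    (hnd : (nct_sets.map Prod.fst).Nodup)
    (p : String × List String) (hp : p ∈ nct_sets) (c : String) :
    (((pvPairs nct_sets).foldl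
        (fun d q => d.modify q.1 [] (fun names => names ++ [q.2])) PySem.Dict.empty).getD c []).contains p.1
    = p.2.contains c := by
  have hinj := List.inj_on_of_nodup_map hnd
  rcases h : p.2.contains c with _ | _
  · simp only [List.contains_eq_mem] at h ⊢
    rw [decide_eq_false_iff_not]
    rw [mem_getD_containing]
    rintro ⟨p', hp', he, hc⟩
    have : p' = p := hinj hp' hp he
    subst this
    simp at h
    exact h hc
  · simp only [List.contains_eq_mem] at h ⊢
    rw [decide_eq_true_iff]
    rw [mem_getD_containing]
    exact ⟨p, hp, rfl, by simpa using h⟩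

theorem compare_nct_sets_spec : Claim_equal_compare_nct_sets := by
  intro nct_sets _hdom hpre
  unfold Spec_compare_nct_sets
  obtain ⟨hne, hnd⟩ := hpre
  match nct_sets, hne with
  | p0 :: rest, _ =>
    simp only [compare_nct_sets, compare_nct_sets_alt]
    rw [containing_eq_pairs_fold]
    apply PySem.List.foldl_congr_mem
    intro disc p hp
    have hmiss :
        PySem.Set.ofList ((((pvPairs (p0 :: rest)).foldl
            (fun d q => d.modify q.1 [] (fun names => names ++ [q.2]))
            PySem.Dict.empty).items.filter (fun q => !(q.2.contains p.1))).map Prod.fst)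
        = PySem.Set.diff
            (rest.foldl (fun acc p => PySem.Set.union acc p.2) (PySem.Set.ofList p0.2)) p.2 := by
      set D := (pvPairs (p0 :: rest)).foldl
        (fun d q => d.modify q.1 [] (fun names => names ++ [q.2])) PySem.Dict.empty with hD
      have hkeys : D.keys = PySem.Set.ofList ((p0 :: rest).flatMap (fun p => p.2)) := by
        rw [hD]; exact keys_containing (p0 :: rest)
      have hnodupkeys : D.keys.Nodup := by
        rw [hkeys]; exact PySem.Set.nodup_ofList _
      rw [PySem.Dict.items_eq_map_keys D hnodupkeys [], List.filter_map, List.map_map]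
      have hfn : ((fun q : String × List String => !(q.2.contains p.1)) ∘
            (fun k => (k, D.getD k []))) = (fun k => !(p.2.contains k)) := by
        funext k
        simp only [Function.comp_apply]
        rw [hD, contains_getD_containing (p0 :: rest) hnd p hp k]
      have hfst : (Prod.fst ∘ (fun k : String => (k, D.getD k []))) = id := by
        funext k; rfl
      rw [hfn, hfst, List.map_id, all_ncts_eq]
      rw [show PySem.Set.diff (PySem.Set.ofList ((p0 :: rest).flatMap (fun p => p.2))) p.2
          = (PySem.Set.ofList ((p0 :: rest).flatMap (fun p => p.2))).filter
              (fun x => !(p.2.contains x)) from rfl]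
      rw [hkeys]
      exact PySem.Set.ofList_eq_self_of_nodup _ (List.Nodup.filter _ (by rw [← hkeys]; exact hnodupkeys))
    rw [hmiss]
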